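-- pv_equiv track=rewrite | github.com/hu-ng/timsort | performance_compare.py | worstCases
-- ===== SOURCE A (Python) =====
-- def worstCases(n):
--     """Generates the worst case scenario for merge sort
--     with maxiimum comparisons possible for every size N"""
--
--     # Holds base cases of N = 1, N = 2
--     lst = [[], [1], [2,1]]
--
--     # Builds worst cases from the bottom up
--     for i in range(3, n + 1):
--         left = lst[i//2]
--         right = lst[i - i//2]
--         left = [x*2 for x in left]
--         right = [y*2 - 1 for y in right]
--         entry = left + right
--         lst.append(entry)
--     return lst
-- ===== SOURCE B (Python) =====
-- def _build(k, memo):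
--     """Worst case of size k: interleave the worst cases of the two merge halves."""
--     if k in memo:
--         return memo[k]
--     if k == 0:
--         res = []
--     elif k == 1:
--         res = [1]
--     elif k == 2:
--         res = [2, 1]
--     else:
--         h = k // 2
--         res = [x * 2 for x in _build(h, memo)] + [y * 2 - 1 for y in _build(k - h, memo)]
--     memo[k] = res
--     return res
--
--
-- def worstCases(n):
--     """Generates the worst case scenario for merge sort
--     with maximum comparisons possible for every size N"""
--     memo = {}
--     return [_build(0, memo), _build(1, memo), _build(2, memo)] + \
--         [_build(i, memo) for i in range(3, n + 1)]
-- ===== Notes on version B (the rewrite author's own statement) =====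
-- stated objective: alternative
-- what changed: Replaces A's bottom-up loop that indexes a growing table of previously built arrays with a memoized top-down recursive helper that builds the worst case for each size by recursing on its two merge halves, assembling the result list from independent helper calls.
import Mathlib
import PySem

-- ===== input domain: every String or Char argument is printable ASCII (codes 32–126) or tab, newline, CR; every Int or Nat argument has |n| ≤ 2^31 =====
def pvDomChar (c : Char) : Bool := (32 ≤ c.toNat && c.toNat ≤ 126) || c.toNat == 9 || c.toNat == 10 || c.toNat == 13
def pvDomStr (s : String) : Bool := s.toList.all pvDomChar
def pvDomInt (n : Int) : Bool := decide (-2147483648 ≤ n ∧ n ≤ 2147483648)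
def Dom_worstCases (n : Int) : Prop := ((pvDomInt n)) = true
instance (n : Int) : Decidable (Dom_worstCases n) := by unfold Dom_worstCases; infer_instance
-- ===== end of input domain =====

-- B replaces A's bottom-up loop indexing a growing table with a memoized top-down recursion on the two merge halves (alternative decomposition, same cost).

-- ===== PORT A =====
-- A's loop: lst starts as the three base cases; each iteration i reads lst[i//2] and
-- lst[i - i//2] (always in range, so pyGetD's default is never used), maps them, appends.
def worstCases (n : Int) : List (List Int) :=
  (PySem.List.pyRange 3 (n + 1) 1).foldl
    (fun lst i =>
      let left := PySem.List.pyGetD lst (PySem.Int.floordiv i 2) []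
      let right := PySem.List.pyGetD lst (i - PySem.Int.floordiv i 2) []
      lst ++ [left.map (· * 2) ++ right.map (· * 2 - 1)])
    [[], [1], [2, 1]]

-- ===== PORT B =====
-- B's helper build(k) with its memo dict threaded through explicitly (Python mutates a
-- closure-captured dict; the port passes it in and returns the updated dict).
def pvBuildMemo (k : Nat) (memo : PySem.Dict Int (List Int)) :
    List Int × PySem.Dict Int (List Int) :=
  match memo.get? (k : Int) with
  | some v => (v, memo)
  | none =>
    if h0 : k = 0 then ([], memo.insert (k : Int) [])
    else if h1 : k = 1 then ([1], memo.insert (k : Int) [1])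
    else if h2 : k = 2 then ([2, 1], memo.insert (k : Int) [2, 1])
    else
      let p := pvBuildMemo (k / 2) memo
      let q := pvBuildMemo (k - k / 2) p.2
      let res := (p.1.map (· * 2)) ++ (q.1.map (· * 2 - 1))
      (res, q.2.insert (k : Int) res)
termination_by k
decreasing_by all_goals omega

def worstCases_alt (n : Int) : List (List Int) :=
  let p0 := pvBuildMemo 0 PySem.Dict.empty
  let p1 := pvBuildMemo 1 p0.2
  let p2 := pvBuildMemo 2 p1.2
  let rest := (PySem.List.pyRange 3 (n + 1) 1).foldl
      (fun acc i =>
        let p := pvBuildMemo i.toNat acc.2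
        (acc.1 ++ [p.1], p.2))
      (([] : List (List Int)), p2.2)
  [p0.1, p1.1, p2.1] ++ rest.1

-- ===== PRECONDITION & SPEC =====
def Spec_worstCases (n : Int) (out : List (List Int)) : Prop := out = worstCases_alt n
instance (n : Int) (out : List (List Int)) : Decidable (Spec_worstCases n out) := by unfold Spec_worstCases; infer_instance

-- ===== CLAIM (what is proved, stated in full; the proofs are below) =====
def Claim_equal_worstCases : Prop := ∀ (n : Int), Dom_worstCases n → Spec_worstCases n (worstCases n)

-- ===== LEMMAS AND PROOFS =====

-- Proof-side pure version of B's build (memoization dropped; used only to state invariants).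
def pvBuild : Nat → List Int
  | 0 => []
  | 1 => [1]
  | 2 => [2, 1]
  | (k + 3) =>
      ((pvBuild ((k + 3) / 2)).map (· * 2)) ++
      ((pvBuild ((k + 3) - (k + 3) / 2)).map (· * 2 - 1))
decreasing_by all_goals omega

-- A memo dict is good when every stored entry is the pure build value of its key.
def GoodMemo (memo : PySem.Dict Int (List Int)) : Prop :=
  ∀ (k : Nat) (v : List Int), memo.get? (k : Int) = some v → v = pvBuild k

theorem goodMemo_insert (memo : PySem.Dict Int (List Int)) (k : Nat)
    (hg : GoodMemo memo) (hv : pvBuild k = v) : GoodMemo (memo.insert (k : Int) v) := by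
  intro k' v' h
  rw [PySem.Dict.get?_insert] at h
  split at h
  · rename_i hk
    cases h
    have : k' = k := by exact_mod_cast hk
    rw [this, ← hv]
  · exact hg k' v' h

theorem pvBuildMemo_correct (k : Nat) :
    ∀ memo, GoodMemo memo →
      (pvBuildMemo k memo).1 = pvBuild k ∧ GoodMemo (pvBuildMemo k memo).2 := by
  induction k using Nat.strong_induction_on with
  | _ k ih =>
    intro memo hg
    cases hget : memo.get? (k : Int) with
    | some v =>
        rw [pvBuildMemo, hget]
        exact ⟨hg k v hget, hg⟩
    | none =>
        rw [pvBuildMemo, hget]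
        by_cases h0 : k = 0
        · subst h0
          exact ⟨by simp [pvBuild], goodMemo_insert memo 0 hg (by simp [pvBuild])⟩
        · by_cases h1 : k = 1
          · subst h1
            exact ⟨by simp [pvBuild], goodMemo_insert memo 1 hg (by simp [pvBuild])⟩
          · by_cases h2 : k = 2
            · subst h2
              exact ⟨by simp [pvBuild], goodMemo_insert memo 2 hg (by simp [pvBuild])⟩
            · simp only [dif_neg h0, dif_neg h1, dif_neg h2]
              obtain ⟨hp1, hp2⟩ := ih (k / 2) (by omega) memo hg
              obtain ⟨hq1, hq2⟩ := ih (k - k / 2) (by omega) _ hp2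
              have hk3 : ∃ m, k = m + 3 := ⟨k - 3, by omega⟩
              obtain ⟨m, rfl⟩ := hk3
              have hb : pvBuild (m + 3) = ((pvBuild ((m + 3) / 2)).map (· * 2)) ++
                  ((pvBuild ((m + 3) - (m + 3) / 2)).map (· * 2 - 1)) := by
                conv_lhs => rw [pvBuild]
              constructor
              · simp only [hp1, hq1, ← hb]
              · exact goodMemo_insert _ (m + 3) hq2 (by rw [hb, hp1, hq1])

-- The fold in B accumulates exactly the pure build values.
theorem fold_memo (l : List Int) :
    ∀ (acc : List (List Int)) (memo : PySem.Dict Int (List Int)), GoodMemo memo →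
      ((l.foldl (fun acc i =>
          let p := pvBuildMemo i.toNat acc.2
          (acc.1 ++ [p.1], p.2)) (acc, memo)).1
        = acc ++ l.map (fun i => pvBuild i.toNat)) := by
  induction l with
  | nil => intro acc memo _; simp
  | cons x l ihl =>
      intro acc memo hg
      obtain ⟨h1, h2⟩ := pvBuildMemo_correct x.toNat memo hg
      simp only [List.foldl_cons, List.map_cons]
      rw [ihl _ _ h2, h1]
      simp

-- B's assembled result in terms of the pure build.
theorem worstCases_alt_eq_pure (n : Int) :
    worstCases_alt n = [pvBuild 0, pvBuild 1, pvBuild 2] ++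
      (PySem.List.pyRange 3 (n + 1) 1).map (fun i => pvBuild i.toNat) := by
  have hg0 : GoodMemo PySem.Dict.empty := by
    intro k v h
    rw [PySem.Dict.get?_empty] at h
    cases h
  obtain ⟨h01, h02⟩ := pvBuildMemo_correct 0 _ hg0
  obtain ⟨h11, h12⟩ := pvBuildMemo_correct 1 _ h02
  obtain ⟨h21, h22⟩ := pvBuildMemo_correct 2 _ h12
  show [_, _, _] ++ _ = _
  rw [fold_memo _ _ _ h22, h01, h11, h21]
  simp

-- Loop invariant of A: after running the loop with bound m+3, the table is pvBuild of 0..m+2.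
theorem worstCases_loop_inv (m : Nat) :
    (PySem.List.pyRange 3 ((m : Int) + 3) 1).foldl
      (fun lst i =>
        let left := PySem.List.pyGetD lst (PySem.Int.floordiv i 2) []
        let right := PySem.List.pyGetD lst (i - PySem.Int.floordiv i 2) []
        lst ++ [left.map (· * 2) ++ right.map (· * 2 - 1)])
      [[], [1], [2, 1]] = (List.range (m + 3)).map pvBuild := by
  induction m with
  | zero =>
      rw [PySem.List.pyRange_one_eq_nil (by omega)]
      simp [List.range_succ, pvBuild]
  | succ m ih =>
      rw [show ((m + 1 : Nat) : Int) + 3 = ((m : Int) + 3) + 1 by push_cast; ring,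
          PySem.List.pyRange_one_succ_right (by omega), List.foldl_append, ih]
      simp only [List.foldl_cons, List.foldl_nil]
      have h1 : PySem.Int.floordiv ((m : Int) + 3) 2 = (((m + 3) / 2 : Nat) : Int) := by
        have := PySem.Int.floordiv_natCast (m + 3) 2
        push_cast at this ⊢; omega
      rw [h1]
      have h2 : ((m : Int) + 3) - (((m + 3) / 2 : Nat) : Int)
          = (((m + 3) - (m + 3) / 2 : Nat) : Int) := by push_cast; omega
      rw [h2]
      rw [PySem.List.pyGetD_natCast, PySem.List.pyGetD_natCast]
      rw [PySem.List.getD_map_range pvBuild (m + 3) ((m + 3) / 2) [] (by omega),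
          PySem.List.getD_map_range pvBuild (m + 3) ((m + 3) - (m + 3) / 2) [] (by omega)]
      have hb : pvBuild (m + 3) = ((pvBuild ((m + 3) / 2)).map (· * 2)) ++
          ((pvBuild ((m + 3) - (m + 3) / 2)).map (· * 2 - 1)) := by
        conv_lhs => rw [pvBuild]
      rw [← hb, show m + 1 + 3 = (m + 3) + 1 by omega, List.range_succ, List.map_append,
          List.map_singleton]
      simp [List.range_succ]

-- A's loop result equals B's assembled list, for every n.
theorem worstCases_eq_alt (n : Int) : worstCases n = worstCases_alt n := by
  rw [worstCases_alt_eq_pure]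
  unfold worstCases
  by_cases h : n + 1 ≤ 3
  · rw [PySem.List.pyRange_one_eq_nil (by omega)]
    simp [pvBuild]
  · have hm : n + 1 = ((n - 2).toNat : Int) + 3 := by omega
    rw [hm, worstCases_loop_inv, PySem.List.pyRange_one]
    rw [show ((n - 2).toNat : Int) + 3 - 3 = ((n - 2).toNat : Int) by ring, Int.toNat_natCast]
    rw [show (n - 2).toNat + 3 = 3 + (n - 2).toNat by omega, List.range_add, List.map_append]
    simp only [List.map_map]
    have hk : List.map ((fun i => pvBuild i.toNat) ∘ (fun k : Nat => (3 : Int) + ↑k))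
        (List.range (n - 2).toNat)
        = List.map (pvBuild ∘ (fun k : Nat => 3 + k)) (List.range (n - 2).toNat) := by
      apply List.map_congr_left
      intro k _
      simp only [Function.comp_apply]
      congr 1
    rw [hk]
    simp [List.range_succ]

-- ===== VERDICT (by name: the statement is the Claim_ definition above) =====
theorem worstCases_spec : Claim_equal_worstCases := by
  intro n _
  exact worstCases_eq_alt n
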